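-- pv_equiv track=rewrite | github.com/mykreeve/advent-of-code-2016 | day14.py | contains_multiple
-- ===== SOURCE A (Python) =====
-- def contains_multiple(text, number):
--     pos = 0
--     while pos < (len(text)-number+1):
--         test_string = text[pos]
--         count = 0
--         for a in range(1,number):
--             if text[pos+a] == test_string:
--                 count += 1
--         if count == number-1:
--             return test_string;
--         pos += 1;
--     return "";
-- ===== SOURCE B (Python) =====
-- def contains_multiple(text, number):
--     i = 0
--     n = len(text)
--     while i < n:
--         j = i
--         while j < n and text[j] == text[i]:
--             j += 1
--         if j - i >= number:
--             return text[i]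
--         i = j
--     return ""
-- ===== Notes on version B (the rewrite author's own statement) =====
-- stated objective: faster
-- what changed: Replaced the per-position window rescan (for each start, re-count number-1 following characters) by a run-skipping two-pointer scan: an inner loop measures each maximal run of equal characters once and the outer pointer jumps to the end of that run, returning the run's character as soon as a run of length >= number is found.
import Mathlib
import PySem

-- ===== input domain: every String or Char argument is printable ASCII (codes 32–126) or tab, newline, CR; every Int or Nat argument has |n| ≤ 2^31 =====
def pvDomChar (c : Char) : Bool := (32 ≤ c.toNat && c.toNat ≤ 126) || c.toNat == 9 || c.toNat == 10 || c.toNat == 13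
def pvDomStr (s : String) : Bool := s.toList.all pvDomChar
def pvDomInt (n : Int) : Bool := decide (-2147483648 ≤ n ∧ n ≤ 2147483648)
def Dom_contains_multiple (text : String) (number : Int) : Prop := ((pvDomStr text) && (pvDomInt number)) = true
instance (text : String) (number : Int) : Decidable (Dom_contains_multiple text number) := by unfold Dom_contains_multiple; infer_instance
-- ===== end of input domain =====

-- B replaces A's per-position window rescan by a run-skipping two-pointer scan (each maximal run measured once, the outer pointer jumps past it); intended as faster, return values proved equal for number >= 1.


-- ===== PORT A =====
-- A's while-loop over pos; fuel bounds the number of iterations (len+1 always suffices on Pre_).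
-- text[pos] / text[pos+a] are in range whenever A returns normally, so the .getD default is never the value used.
def pvAloop (text : String) (number : Int) (pos : Int) : Nat → String
  | 0 => ""
  | fuel + 1 =>
    if pos < PySem.Str.len text - number + 1 then
      let test_string := (PySem.Str.pyGet? text pos).getD ' '
      let count := (PySem.List.pyRange 1 number 1).foldl
        (fun count a =>
          if ((PySem.Str.pyGet? text (pos + a)).getD ' ' == test_string) then count + 1 else count)
        (0 : Int)
      if count == number - 1 then String.ofList [test_string]
      else pvAloop text number (pos + 1) fuel
    else ""

def contains_multiple (text : String) (number : Int) : String :=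
  pvAloop text number 0 (text.toList.length + 1)

-- ===== PORT B =====
-- B's inner while loop: length of the run of copies of c at the front of the remaining characters.
def pvBrunLen (c : Char) : List Char → Nat
  | [] => 0
  | d :: rest => if d == c then pvBrunLen c rest + 1 else 0

-- B's outer while loop on the suffix starting at i: measure the maximal run at the front,
-- return its character if it is long enough, otherwise jump past the whole run (i = j).
def pvBloop (number : Int) : List Char → String
  | [] => ""
  | c :: rest =>
    let r := pvBrunLen c rest + 1
    if number ≤ (r : Int) then String.ofList [c]
    else pvBloop number (rest.drop (r - 1))
termination_by cs => cs.length
decreasing_by simp only [List.length_cons, List.length_drop]; omega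

def contains_multiple_alt (text : String) (number : Int) : String :=
  pvBloop number text.toList

-- ===== PRECONDITION & SPEC =====
-- For number <= 0 the Python A always raises IndexError (text[pos] runs past the end of the string); Pre_ excludes exactly that.
def Pre_contains_multiple (text : String) (number : Int) : Prop := 1 ≤ number
instance (text : String) (number : Int) : Decidable (Pre_contains_multiple text number) := by
  unfold Pre_contains_multiple; infer_instance

def pvWitness_contains_multiple : String × Int := ("aabbb", 3)

def Spec_contains_multiple (text : String) (number : Int) (out : String) : Prop :=
  out = contains_multiple_alt text number
instance (text : String) (number : Int) (out : String) : Decidable (Spec_contains_multiple text number out) := by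
  unfold Spec_contains_multiple; infer_instance

-- ===== CLAIM (what is proved, stated in full; the proofs are below) =====
def Claim_equal_contains_multiple : Prop := ∀ (text : String) (number : Int), Dom_contains_multiple text number → Pre_contains_multiple text number → Spec_contains_multiple text number (contains_multiple text number)

-- ===== LEMMAS AND PROOFS =====

-- the characterisation both ports are reduced to:
-- first suffix whose first n characters exist and are all equal to its head.
def wfind (n : Nat) : List Char → String
  | [] => ""
  | c :: rest =>
    if n ≤ (c :: rest).length ∧ ((c :: rest).take n).all (· == c) then String.ofList [c]
    else wfind n rest

theorem wfind_short {n : Nat} : ∀ {cs : List Char}, cs.length < n → wfind n cs = "" := by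
  intro cs
  induction cs with
  | nil => intro _; rfl
  | cons c rest ih =>
    intro h
    simp only [wfind]
    rw [if_neg]
    · exact ih (by simpa using Nat.lt_of_succ_lt h)
    · rintro ⟨h1, _⟩
      simp only [List.length_cons] at h1 h
      omega

theorem wfind_skip {n : Nat} (d c : Char) (rest : List Char) (hdc : d ≠ c) :
    ∀ r : Nat, r < n → wfind n (List.replicate r c ++ d :: rest) = wfind n (d :: rest) := by
  intro r
  induction r with
  | zero => intro _; rfl
  | succ k ih =>
    intro hk
    have hre : List.replicate (k + 1) c ++ d :: rest = c :: (List.replicate k c ++ d :: rest) := by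
      simp [List.replicate_succ]
    rw [hre]
    simp only [wfind]
    rw [if_neg]
    · exact ih (by omega)
    · rintro ⟨h1, h2⟩
      rw [List.all_eq_true] at h2
      have hlen2 : k + 1 < ((c :: (List.replicate k c ++ d :: rest)).take n).length := by
        simp only [List.length_take, List.length_cons, List.length_append, List.length_replicate]
        simp at h1
        omega
      have hd : ((c :: (List.replicate k c ++ d :: rest)).take n)[k+1]'hlen2 = d := by
        rw [List.getElem_take]
        rw [List.getElem_cons_succ]
        rw [List.getElem_append_right (by simp)]
        simp
      have := h2 _ (List.getElem_mem hlen2)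
      rw [hd] at this
      simp at this
      exact hdc this

-- the run at the front really is a run: the first runLen characters equal c …
theorem runLen_take (c : Char) : ∀ rest : List Char,
    rest.take (pvBrunLen c rest) =
      List.replicate (pvBrunLen c rest) c := by
  intro rest
  induction rest with
  | nil => rfl
  | cons d t ih =>
    by_cases hdc : d = c
    · subst hdc
      simp only [pvBrunLen, beq_self_eq_true, if_true, List.take_succ_cons,
        List.replicate_succ, ih]
    · simp [pvBrunLen, hdc]

-- … and the character after it (if any) differs from c.
theorem runLen_drop_head (c : Char) : ∀ (rest : List Char) (d : Char),
    (rest.drop (pvBrunLen c rest)).head? = some d → d ≠ c := by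
  intro rest
  induction rest with
  | nil => intro d h; simp at h
  | cons e t ih =>
    intro d h
    by_cases hec : e = c
    · subst hec
      simp only [pvBrunLen, beq_self_eq_true, if_true, List.drop_succ_cons] at h
      exact ih d h
    · simp only [pvBrunLen, beq_iff_eq, hec, if_false, List.drop_zero,
        List.head?_cons, Option.some.injEq] at h
      subst h; exact hec

theorem run_decomp (c : Char) (rest : List Char) :
    c :: rest = List.replicate (pvBrunLen c rest + 1) c ++
      rest.drop (pvBrunLen c rest) := by
  conv_lhs => rw [← List.take_append_drop (pvBrunLen c rest) rest]
  rw [runLen_take]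
  simp [List.replicate_succ]

-- B's outer loop computes wfind, run by run.
theorem pvBloop_eq_wfind (n : Nat) :
    ∀ (m : Nat) (cs : List Char), cs.length ≤ m →
      pvBloop (n : Int) cs = wfind n cs := by
  intro m
  induction m with
  | zero =>
    intro cs hcs
    have : cs = [] := List.eq_nil_of_length_eq_zero (by omega)
    subst this
    simp [pvBloop, wfind]
  | succ m ih =>
    intro cs hcs
    cases cs with
    | nil => simp [pvBloop, wfind]
    | cons c rest =>
      set k := pvBrunLen c rest with hk
      have hdec := run_decomp c rest
      simp only [pvBloop, ← hk]
      by_cases hcond : (n : Int) ≤ ((k + 1 : Nat) : Int)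
      · rw [if_pos hcond]
        have hnk : n ≤ k + 1 := by exact_mod_cast hcond
        have hlenge : n ≤ (c :: rest).length := by
          rw [hdec]; simp only [List.length_append, List.length_replicate]; omega
        have htake : (c :: rest).take n = List.replicate n c := by
          rw [hdec, List.take_append_of_le_length (by simp; omega), List.take_replicate]
          congr 1; omega
        simp only [wfind]
        rw [if_pos ?_]
        refine ⟨hlenge, ?_⟩
        rw [htake, List.all_eq_true]
        intro x hx
        simp [List.eq_of_mem_replicate hx]
      · rw [if_neg hcond]
        have hnk : k + 1 < n := by
          by_contra h
          exact hcond (by exact_mod_cast Nat.le_of_not_lt (by omega : ¬ n > k + 1))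
        have hsimp : k + 1 - 1 = k := by omega
        rw [hsimp]
        have hlt : (rest.drop k).length ≤ m := by
          simp only [List.length_cons] at hcs
          simp only [List.length_drop]; omega
        rw [ih (rest.drop k) hlt]
        rw [← hk] at hdec
        rw [hdec]
        cases hdk : rest.drop k with
        | nil =>
          rw [List.append_nil]
          exact (wfind_short (cs := List.replicate (k + 1) c)
            (by simp only [List.length_replicate]; omega)).symm
        | cons d t =>
          have hdc : d ≠ c := runLen_drop_head c rest d (by rw [hdk]; rfl)
          exact (wfind_skip d c t hdc (k + 1) hnk).symm

-- the window condition A's inner for-loop tests, as wfind's all-equal condition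
theorem count_iff_window (text : String) (n p : Nat) (hn : 1 ≤ n)
    (hpn : p + n ≤ text.toList.length) :
    ((PySem.List.pyRange 1 (n : Int) 1).countP
        (fun a => ((PySem.Str.pyGet? text ((p : Int) + a)).getD ' '
          == (PySem.Str.pyGet? text (p : Int)).getD ' ')) = n - 1)
      ↔ (((text.toList.drop p).take n).all
          (· == (PySem.Str.pyGet? text (p : Int)).getD ' ')) = true := by
  set cs := text.toList with hcs
  have hp : p < cs.length := by omega
  have hc : (PySem.Str.pyGet? text (p : Int)).getD ' ' = cs[p] := by
    rw [PySem.Str.pyGet?_natCast, ← hcs, List.getElem?_eq_getElem hp]; rfl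
  have hlenr : (PySem.List.pyRange 1 (n : Int) 1).length = n - 1 := by
    rw [PySem.List.length_pyRange_one]; omega
  rw [← hlenr, List.countP_eq_length]
  constructor
  · intro h
    rw [List.all_eq_true]
    intro x hx
    rw [List.mem_iff_getElem] at hx
    obtain ⟨k, hk, hxk⟩ := hx
    have hklen : k < n := by
      simp only [List.length_take, List.length_drop] at hk; omega
    have hkcs : p + k < cs.length := by omega
    have hxv : x = cs[p + k]'hkcs := by
      rw [← hxk, List.getElem_take, List.getElem_drop]
    by_cases hk0 : k = 0
    · subst hk0
      rw [hc, hxv]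
      simp
    · have hmem : ((k : Int)) ∈ PySem.List.pyRange 1 (n : Int) 1 := by
        rw [PySem.List.mem_pyRange_one]; omega
      have h2 := h _ hmem
      have hget : (PySem.Str.pyGet? text ((p : Int) + (k : Int))).getD ' ' = cs[p + k]'hkcs := by
        have hcast : ((p : Int) + (k : Int)) = ((p + k : Nat) : Int) := by push_cast; ring
        rw [hcast, PySem.Str.pyGet?_natCast, ← hcs, List.getElem?_eq_getElem hkcs]; rfl
      rw [hget, hc] at h2
      rw [hxv, hc]
      simpa using h2
  · intro h a ha
    rw [PySem.List.mem_pyRange_one] at ha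
    have hk : a.toNat < n := by omega
    have hkcs : p + a.toNat < cs.length := by omega
    have hget : (PySem.Str.pyGet? text ((p : Int) + a)).getD ' ' = cs[p + a.toNat]'hkcs := by
      have hcast : ((p : Int) + a) = ((p + a.toNat : Nat) : Int) := by omega
      rw [hcast, PySem.Str.pyGet?_natCast, ← hcs, List.getElem?_eq_getElem hkcs]; rfl
    rw [List.all_eq_true] at h
    have hmemx : cs[p + a.toNat]'hkcs ∈ (cs.drop p).take n := by
      rw [List.mem_iff_getElem]
      refine ⟨a.toNat, by simp only [List.length_take, List.length_drop]; omega, ?_⟩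
      rw [List.getElem_take, List.getElem_drop]
    have h2 := h _ hmemx
    rw [hget, hc]
    rw [hc] at h2
    simpa using h2

-- A's while-loop at position p equals wfind on the suffix from p.
theorem pvAloop_eq_wfind (text : String) (n : Nat) (hn : 1 ≤ n) :
    ∀ (fuel p : Nat), text.toList.length + 1 ≤ fuel + p →
      pvAloop text (n : Int) (p : Int) fuel = wfind n (text.toList.drop p) := by
  intro fuel
  induction fuel with
  | zero =>
    intro p hp
    rw [List.drop_eq_nil_of_le (by omega)]; rfl
  | succ fuel ih =>
    intro p hp
    set cs := text.toList with hcs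
    simp only [pvAloop]
    have hlen : PySem.Str.len text = (cs.length : Int) := by simp [PySem.Str.len_eq, ← hcs]
    by_cases hg : (p : Int) < PySem.Str.len text - (n : Int) + 1
    · rw [if_pos hg]
      rw [hlen] at hg
      have hpn : p + n ≤ cs.length := by omega
      have hp' : p < cs.length := by omega
      have hc : (PySem.Str.pyGet? text (p : Int)).getD ' ' = cs[p] := by
        rw [PySem.Str.pyGet?_natCast, ← hcs, List.getElem?_eq_getElem hp']; rfl
      rw [PySem.List.foldl_count_if]
      have hdrop : cs.drop p = cs[p] :: cs.drop (p + 1) := (List.getElem_cons_drop hp').symm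
      by_cases hcond : ((PySem.List.pyRange 1 (n : Int) 1).countP
          (fun a => ((PySem.Str.pyGet? text ((p : Int) + a)).getD ' '
            == (PySem.Str.pyGet? text (p : Int)).getD ' ')) = n - 1)
      · rw [if_pos (by simp only [beq_iff_eq]; omega)]
        rw [hdrop]
        simp only [wfind]
        rw [if_pos]
        · rw [hc]
        · rw [← hdrop]
          refine ⟨by simp only [List.length_drop]; omega, ?_⟩
          have hw := (count_iff_window text n p hn hpn).mp hcond
          rw [hc] at hw
          exact hw
      · rw [if_neg (by simp only [beq_iff_eq]; omega)]
        have hrec : ((p : Int) + 1) = ((p + 1 : Nat) : Int) := by push_cast; ring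
        rw [hrec, ih (p + 1) (by omega)]
        rw [hdrop]
        simp only [wfind]
        rw [if_neg]
        rintro ⟨h1, h2⟩
        rw [← hdrop] at h2
        refine hcond ((count_iff_window text n p hn hpn).mpr ?_)
        rw [hc]
        exact h2
    · rw [if_neg hg]
      rw [hlen] at hg
      exact (wfind_short (by simp only [List.length_drop]; omega)).symm

-- ===== VERDICT (by name: the statement is the Claim_ definition above) =====
theorem contains_multiple_spec : Claim_equal_contains_multiple := by
  unfold Claim_equal_contains_multiple
  intro text number _hdom hpre
  unfold Spec_contains_multiple
  unfold Pre_contains_multiple at hpre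
  have hn : number = ((number.toNat : Nat) : Int) := by omega
  have h1 : 1 ≤ number.toNat := by omega
  rw [hn]
  unfold contains_multiple contains_multiple_alt
  have hA := pvAloop_eq_wfind text number.toNat h1 (text.toList.length + 1) 0 (by omega)
  simp only [Nat.cast_zero, List.drop_zero] at hA
  rw [hA, pvBloop_eq_wfind number.toNat text.toList.length text.toList le_rfl]
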